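-- pv_equiv track=rewrite | github.com/elric3179/Advent_Of_Code_2024 | Day_07/7.py | operations_1
-- ===== SOURCE A (Python) =====
-- def operations_1(liste, val):
--     if len(liste) == 1:
--         return [liste[0]]
--     else:
--         element = liste[-1]
--         plus = operations_1(liste[:-1], val)
--         mul = plus.copy()
--         l = []
--         for index in range(len(plus)):
--             if element + plus[index] <= val:
--                 l.append(plus[index] + element)
--             if element * mul[index] <= val:
--                 l.append(mul[index] * element)
--         return l
-- ===== SOURCE B (Python) =====
-- def operations_1(liste, val):
--     result = [liste[0]]
--     for element in liste[1:]:
--         l = []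
--         for v in result:
--             if element + v <= val:
--                 l.append(v + element)
--             if element * v <= val:
--                 l.append(v * element)
--         result = l
--     return result
-- ===== Notes on version B (the rewrite author's own statement) =====
-- stated objective: simpler
-- what changed: Replaced the recursion that peels the last element and re-slices the list at every level with a single left-to-right iterative loop that maintains the reachable-values list, removing the O(n^2) slice copying and the redundant mul copy.
import Mathlib
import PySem

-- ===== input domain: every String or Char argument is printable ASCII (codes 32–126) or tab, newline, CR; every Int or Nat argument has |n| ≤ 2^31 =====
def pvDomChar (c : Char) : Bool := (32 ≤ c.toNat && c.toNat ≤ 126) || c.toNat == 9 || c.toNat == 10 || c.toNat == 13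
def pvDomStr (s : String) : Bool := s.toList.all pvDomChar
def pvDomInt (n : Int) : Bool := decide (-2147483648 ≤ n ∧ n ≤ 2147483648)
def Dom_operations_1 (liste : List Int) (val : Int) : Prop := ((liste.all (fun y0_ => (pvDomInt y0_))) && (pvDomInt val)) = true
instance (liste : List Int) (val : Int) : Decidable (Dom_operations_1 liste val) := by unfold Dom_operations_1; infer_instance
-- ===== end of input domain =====

-- B replaces A's peel-the-last-element recursion (which copies a slice of the list at every
-- level) by one iterative left-to-right loop over the list — simpler, no slicing, no `mul` copy.

-- ===== PORT A =====
-- the two appends of one loop iteration of A (plus-branch first, then mul-branch)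
def pvOpsAdd (val element : Int) (l : List Int) (v : Int) : List Int :=
  let l := if element + v ≤ val then l ++ [v + element] else l
  if element * v ≤ val then l ++ [v * element] else l

def operations_1 (liste : List Int) (val : Int) : List Int :=
  if liste.length = 1 then
    [(PySem.List.pyGet? liste 0).getD 0]  -- liste[0]; in range since len = 1
  else
    match h : PySem.List.pyGet? liste (-1) with
    | none => []  -- liste[-1] raises IndexError (empty list); excluded by Pre_
    | some element =>
      let plus := operations_1 (PySem.List.slice liste none (some (-1))) val
      -- mul = plus.copy(): same values, so both reads below are reads of plus
      (PySem.List.pyRange 0 (plus.length : Int) 1).foldl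
        (fun l index => pvOpsAdd val element l (PySem.List.pyGetD plus index 0)) []
termination_by liste.length
decreasing_by
  simp only [PySem.List.slice_to_neg_one]
  have hne : liste ≠ [] := by rintro rfl; simp [PySem.List.pyGet?] at h
  have := List.length_pos_iff.mpr hne
  simp [List.length_dropLast]; omega

-- ===== PORT B =====
-- one pass of B's outer loop: rebuild the result list for one element
def pvStep (val : Int) (result : List Int) (element : Int) : List Int :=
  result.foldl (fun l v =>
    let l := if element + v ≤ val then l ++ [v + element] else l
    if element * v ≤ val then l ++ [v * element] else l) []

def operations_1_alt (liste : List Int) (val : Int) : List Int :=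
  match liste with
  | [] => []  -- liste[0] raises IndexError; excluded by Pre_
  | x :: rest => rest.foldl (pvStep val) [x]

-- ===== PRECONDITION & SPEC =====
-- Pre_ excludes only the empty list, on which A raises IndexError (liste[-1]).
def Pre_operations_1 (liste : List Int) (val : Int) : Prop := liste ≠ []
instance (liste : List Int) (val : Int) : Decidable (Pre_operations_1 liste val) := by
  unfold Pre_operations_1; infer_instance

def pvWitness_operations_1 : List Int × Int := ([2, 3, 5], 20)

def Spec_operations_1 (liste : List Int) (val : Int) (out : List Int) : Prop := out = operations_1_alt liste val
instance (liste : List Int) (val : Int) (out : List Int) : Decidable (Spec_operations_1 liste val out) := by unfold Spec_operations_1; infer_instance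

-- ===== CLAIM (what is proved, stated in full; the proofs are below) =====
def Claim_equal_operations_1 : Prop := ∀ (liste : List Int) (val : Int), Dom_operations_1 liste val → Pre_operations_1 liste val → Spec_operations_1 liste val (operations_1 liste val)

-- ===== LEMMAS AND PROOFS =====

-- A's per-level loop over range(len(plus)) is B's one pass pvStep over plus
theorem pvLoopA_eq_step (val element : Int) (plus : List Int) :
    (PySem.List.pyRange 0 (plus.length : Int) 1).foldl
        (fun l index => pvOpsAdd val element l (PySem.List.pyGetD plus index 0)) []
      = pvStep val plus element := by
  rw [PySem.List.foldl_pyRange_zero_pyGetD']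
  rfl

-- main invariant: A on x :: rest is B's left fold, by induction on rest from the right
theorem operations_1_eq_foldl (val x : Int) (rest : List Int) :
    operations_1 (x :: rest) val = rest.foldl (pvStep val) [x] := by
  induction rest using List.reverseRecOn with
  | nil => simp [operations_1]
  | append_singleton ys e ih =>
    rw [operations_1]
    have hlen : (x :: (ys ++ [e])).length ≠ 1 := by simp
    rw [if_neg hlen]
    have hget : PySem.List.pyGet? (x :: (ys ++ [e])) (-1) = some e := by
      rw [show x :: (ys ++ [e]) = (x :: ys) ++ [e] by simp,
        PySem.List.pyGet?_neg_one_append_singleton]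
    rw [hget]
    have hslice : PySem.List.slice (x :: (ys ++ [e])) none (some (-1)) = x :: ys := by
      rw [PySem.List.slice_to_neg_one,
        show x :: (ys ++ [e]) = (x :: ys) ++ [e] by simp, List.dropLast_concat]
    simp only [hslice, ih, pvLoopA_eq_step, List.foldl_append, List.foldl_cons, List.foldl_nil]

-- ===== VERDICT (by name: the statement is the Claim_ definition above) =====
theorem operations_1_spec : Claim_equal_operations_1 := by
  intro liste val _ hpre
  unfold Spec_operations_1
  match liste with
  | [] => exact absurd rfl hpre
  | x :: rest => exact operations_1_eq_foldl val x rest
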